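-- pv_equiv track=rewrite | github.com/JosephTLyons/code_war_solutions | 7_kyu/hells_kitchen.py | gordon
-- ===== SOURCE A (Python) =====
-- def gordon(a):
--     word_string = a.upper()
--     letter_to_replacement_symbol_dictionary = {
--         "A": "@",
--         "E": "*",
--         "I": "*",
--         "O": "*",
--         "U": "*",
--     }
--
--     for letter, replacement_symbol in letter_to_replacement_symbol_dictionary.items():
--         word_string = word_string.replace(letter, replacement_symbol)
--
--     words = word_string.split()
--     words = [word + "!!!!" for word in words]
--
--     return " ".join(words)
-- ===== SOURCE B (Python) =====
-- def gordon(a):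
--     parts = []
--     in_word = False
--     for c in a.upper():
--         if c.isspace():
--             if in_word:
--                 parts.append("!!!!")
--                 in_word = False
--         else:
--             if not in_word and parts:
--                 parts.append(" ")
--             in_word = True
--             parts.append("@" if c == "A" else "*" if c in "EIOU" else c)
--     if in_word:
--         parts.append("!!!!")
--     return "".join(parts)
-- ===== Notes on version B (the rewrite author's own statement) =====
-- stated objective: alternative
-- what changed: Replaces A's five whole-string replace scans plus split/map/join staging by a single left-to-right state machine over the uppercased characters that emits the transformed output (vowel symbols, word separators, '!!!!' suffixes) directly with an in_word flag.
import Mathlib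
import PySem

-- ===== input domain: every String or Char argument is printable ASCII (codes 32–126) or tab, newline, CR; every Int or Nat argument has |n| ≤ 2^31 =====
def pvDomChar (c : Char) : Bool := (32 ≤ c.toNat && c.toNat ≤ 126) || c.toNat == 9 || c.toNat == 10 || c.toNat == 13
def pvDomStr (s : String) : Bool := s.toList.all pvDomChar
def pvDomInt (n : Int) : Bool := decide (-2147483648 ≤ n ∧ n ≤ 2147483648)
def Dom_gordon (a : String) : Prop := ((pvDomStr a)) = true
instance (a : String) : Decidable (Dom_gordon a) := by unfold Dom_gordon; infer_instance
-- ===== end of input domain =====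

-- B replaces A's five whole-string replace scans plus split/join by a single left-to-right state-machine pass emitting the output directly (alternative decomposition, same cost).


-- ===== PORT A =====
-- the literal dict of A (single-char string keys/values, ported as Char per the per-character domain)
def gordonDictA : PySem.Dict Char Char :=
  ((((PySem.Dict.empty.insert 'A' '@').insert 'E' '*').insert 'I' '*').insert 'O' '*').insert 'U' '*'

def gordon (a : String) : String :=
  let wordString := gordonDictA.items.foldl
    (fun s p => PySem.Chars.replace s [p.1] [p.2]) (PySem.Chars.upper a.toList)
  let words := (PySem.Chars.split₀ wordString).map (fun w => w ++ ['!', '!', '!', '!'])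
  String.ofList (PySem.Chars.join [' '] words)

-- ===== PORT B =====
-- one step of Source B's loop: state = (output characters so far, in_word flag)
def gordonStep (st : List Char × Bool) (c : Char) : List Char × Bool :=
  if PySem.Chars.isspace c then
    if st.2 then (st.1 ++ ['!', '!', '!', '!'], false) else st
  else
    ((if !st.2 && !st.1.isEmpty then st.1 ++ [' '] else st.1) ++
      [if c = 'A' then '@' else if c = 'E' ∨ c = 'I' ∨ c = 'O' ∨ c = 'U' then '*' else c],
     true)

def gordon_alt (a : String) : String :=
  let st := (PySem.Chars.upper a.toList).foldl gordonStep ([], false)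
  String.ofList (if st.2 then st.1 ++ ['!', '!', '!', '!'] else st.1)

-- ===== PRECONDITION & SPEC =====
def Spec_gordon (a : String) (out : String) : Prop := out = gordon_alt a
instance (a : String) (out : String) : Decidable (Spec_gordon a out) := by unfold Spec_gordon; infer_instance

-- ===== CLAIM (what is proved, stated in full; the proofs are below) =====
def Claim_equal_gordon : Prop := ∀ (a : String), Dom_gordon a → Spec_gordon a (gordon a)

-- ===== LEMMAS AND PROOFS =====

def bang : List Char := ['!', '!', '!', '!']

-- the combined vowel substitution as one character function
def vmap (c : Char) : Char :=
  if c = 'A' then '@' else if c = 'E' then '*' else if c = 'I' then '*'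
  else if c = 'O' then '*' else if c = 'U' then '*' else c

theorem replace_go_single (o n : Char) :
    ∀ (fuel : Nat) (l acc : List Char),
      PySem.Chars.replace.go [o] [n] fuel l acc =
        acc.reverse ++ (l.take fuel).map (fun c => if c = o then n else c) ++ l.drop fuel := by
  intro fuel
  induction fuel with
  | zero => intro l acc; simp [PySem.Chars.replace.go]
  | succ f ih =>
    intro l acc
    cases l with
    | nil => simp [PySem.Chars.replace.go]
    | cons c t =>
      simp only [PySem.Chars.replace.go]
      by_cases h : c = o
      · subst h
        rw [if_pos (by simp [List.isPrefixOf])]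
        rw [ih]
        simp
      · rw [if_neg (by simp [List.isPrefixOf, Ne.symm h])]
        rw [ih]
        simp [h]

theorem replace_single (o n : Char) (l : List Char) :
    PySem.Chars.replace l [o] [n] = l.map (fun c => if c = o then n else c) := by
  unfold PySem.Chars.replace
  rw [if_neg (by simp)]
  rw [replace_go_single]
  simp

theorem foldl_replace_eq_map (l : List Char) :
    gordonDictA.items.foldl (fun s p => PySem.Chars.replace s [p.1] [p.2]) l = l.map vmap := by
  have h : gordonDictA.items = [('A','@'),('E','*'),('I','*'),('O','*'),('U','*')] := by decide
  rw [h]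
  simp only [List.foldl, replace_single, List.map_map]
  congr 1
  funext c
  simp only [Function.comp, vmap]
  by_cases hA : c = 'A' <;> by_cases hE : c = 'E' <;> by_cases hI : c = 'I' <;>
    by_cases hO : c = 'O' <;> by_cases hU : c = 'U' <;> simp_all

theorem vmap_isspace (c : Char) : PySem.Chars.isspace (vmap c) = PySem.Chars.isspace c := by
  unfold vmap
  split_ifs with h1 h2 h3 h4 h5 <;> first | (subst_vars; decide) | rfl

theorem split0_go_map (g : Char → Char)
    (hg : ∀ c, PySem.Chars.isspace (g c) = PySem.Chars.isspace c) :
    ∀ (cs cur : List Char) (acc : List (List Char)),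
      PySem.Chars.split₀.go (cs.map g) (cur.map g) (acc.map (List.map g)) =
        (PySem.Chars.split₀.go cs cur acc).map (List.map g) := by
  intro cs
  induction cs with
  | nil =>
    intro cur acc
    simp only [List.map_nil, PySem.Chars.split₀.go]
    by_cases h : cur.isEmpty <;> simp [h]
  | cons c t ih =>
    intro cur acc
    simp only [List.map_cons, PySem.Chars.split₀.go, hg c]
    by_cases hs : PySem.Chars.isspace c
    · simp only [hs, if_true]
      by_cases h : cur.isEmpty
      · simpa [h] using ih [] acc
      · simp only [h, Bool.false_eq_true]
        have := ih [] (cur.reverse :: acc)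
        simpa [h] using this
    · simp only [hs, if_false, Bool.false_eq_true]
      exact ih (c :: cur) acc

theorem split0_map (g : Char → Char)
    (hg : ∀ c, PySem.Chars.isspace (g c) = PySem.Chars.isspace c) (l : List Char) :
    PySem.Chars.split₀ (l.map g) = (PySem.Chars.split₀ l).map (List.map g) := by
  unfold PySem.Chars.split₀
  simpa using split0_go_map g hg l [] []

-- the A-side finished-output of a list of raw words
def doneW (ws : List (List Char)) : List Char :=
  PySem.Chars.join [' '] (ws.map (fun w => w.map vmap ++ bang))

theorem doneW_nil : doneW [] = [] := by simp [doneW, PySem.Chars.join, List.intercalate]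

theorem doneW_ne_nil (ws : List (List Char)) (h : ws ≠ []) : doneW ws ≠ [] := by
  cases ws with
  | nil => exact absurd rfl h
  | cons w t =>
    cases t with
    | nil => simp [doneW, PySem.Chars.join, List.intercalate, bang]
    | cons y s => simp [doneW, PySem.Chars.join, List.intercalate, bang]

theorem doneW_snoc (ws : List (List Char)) (w : List Char) :
    doneW (ws ++ [w]) =
      doneW ws ++ (if ws.isEmpty then [] else [' ']) ++ (w.map vmap ++ bang) := by
  induction ws with
  | nil => simp [doneW, PySem.Chars.join, List.intercalate]
  | cons x t ih =>
    cases t with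
    | nil => simp [doneW, PySem.Chars.join, List.intercalate, List.intersperse]
    | cons y s =>
      have h1 : doneW ((x :: y :: s) ++ [w]) =
          x.map vmap ++ bang ++ [' '] ++ doneW ((y :: s) ++ [w]) := by
        simp [doneW, PySem.Chars.join, List.intercalate, List.intersperse]
      have h2 : doneW (x :: y :: s) = x.map vmap ++ bang ++ [' '] ++ doneW (y :: s) := by
        simp [doneW, PySem.Chars.join, List.intercalate]
      rw [h1, ih, h2]
      simp

-- the fold state of Source B's loop corresponding to split₀.go's state (ws reversed done words, cur reversed current word)
def stB (ws : List (List Char)) (cur : List Char) : List Char × Bool :=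
  (if cur.isEmpty then doneW ws.reverse
   else doneW ws.reverse ++ (if ws.isEmpty then [] else [' ']) ++ cur.reverse.map vmap,
   !cur.isEmpty)

def finalize (st : List Char × Bool) : List Char :=
  if st.2 then st.1 ++ bang else st.1

theorem step_char_eq_vmap (c : Char) :
    (if c = 'A' then '@' else if c = 'E' ∨ c = 'I' ∨ c = 'O' ∨ c = 'U' then '*' else c) = vmap c := by
  unfold vmap
  by_cases hA : c = 'A' <;> by_cases hE : c = 'E' <;> by_cases hI : c = 'I' <;>
    by_cases hO : c = 'O' <;> by_cases hU : c = 'U' <;> simp_all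

theorem main_invariant :
    ∀ (cs : List Char) (ws : List (List Char)) (cur : List Char),
      finalize (cs.foldl gordonStep (stB ws cur)) =
        doneW (PySem.Chars.split₀.go cs cur ws) := by
  intro cs
  induction cs with
  | nil =>
    intro ws cur
    by_cases h : cur.isEmpty
    · have hc : cur = [] := by simpa [List.isEmpty_iff] using h
      subst hc
      simp [finalize, stB, PySem.Chars.split₀.go]
    · have hc : cur ≠ [] := by simpa [List.isEmpty_iff] using h
      simp only [List.foldl_nil, PySem.Chars.split₀.go, h, Bool.false_eq_true, if_false]
      simp only [finalize, stB, h, Bool.not_false, if_false, if_true, Bool.false_eq_true]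
      rw [show (cur.reverse :: ws).reverse = ws.reverse ++ [cur.reverse] by simp]
      rw [doneW_snoc]
      simp [List.append_assoc]
  | cons c t ih =>
    intro ws cur
    simp only [List.foldl_cons, PySem.Chars.split₀.go]
    by_cases hs : PySem.Chars.isspace c
    · simp only [hs, if_true]
      by_cases h : cur.isEmpty
      · have hc : cur = [] := by simpa [List.isEmpty_iff] using h
        subst hc
        have : gordonStep (stB ws []) c = stB ws [] := by
          simp [gordonStep, stB, hs]
        rw [this]
        exact ih ws []
      · have hc : cur ≠ [] := by simpa [List.isEmpty_iff] using h
        simp only [h, Bool.false_eq_true, if_false]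
        have : gordonStep (stB ws cur) c = stB (cur.reverse :: ws) [] := by
          simp only [gordonStep, stB, h, hs, Bool.not_false, if_true, Bool.false_eq_true, if_false,
            List.isEmpty_nil]
          rw [show (cur.reverse :: ws).reverse = ws.reverse ++ [cur.reverse] by simp]
          rw [doneW_snoc]
          simp [List.append_assoc, bang]
        rw [this]
        exact ih (cur.reverse :: ws) []
    · simp only [hs, Bool.false_eq_true, if_false]
      have : gordonStep (stB ws cur) c = stB ws (c :: cur) := by
        simp only [gordonStep, stB, hs, Bool.false_eq_true, if_false, step_char_eq_vmap]
        by_cases h : cur.isEmpty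
        · have hc : cur = [] := by simpa [List.isEmpty_iff] using h
          subst hc
          by_cases hw : ws.isEmpty
          · have hww : ws = [] := by simpa [List.isEmpty_iff] using hw
            subst hww
            simp [doneW_nil]
          · have hww : ws ≠ [] := by simpa [List.isEmpty_iff] using hw
            have hne : doneW ws.reverse ≠ [] := doneW_ne_nil _ (by simpa using hww)
            simp [hw, hne]
        · have hc : cur ≠ [] := by simpa [List.isEmpty_iff] using h
          simp [h, List.append_assoc]
      rw [this]
      exact ih ws (c :: cur)

-- ===== VERDICT (by name: the statement is the Claim_ definition above) =====
theorem gordon_spec : Claim_equal_gordon := by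
  intro a _
  show gordon a = gordon_alt a
  simp only [gordon, gordon_alt, foldl_replace_eq_map, split0_map vmap vmap_isspace]
  have h := main_invariant (PySem.Chars.upper a.toList) [] []
  simp only [stB, List.isEmpty_nil, if_true, Bool.not_true, List.reverse_nil, doneW_nil] at h
  have hfin : (if ((PySem.Chars.upper a.toList).foldl gordonStep ([], false)).2 then
      ((PySem.Chars.upper a.toList).foldl gordonStep ([], false)).1 ++ ['!', '!', '!', '!']
    else ((PySem.Chars.upper a.toList).foldl gordonStep ([], false)).1) =
      finalize ((PySem.Chars.upper a.toList).foldl gordonStep ([], false)) := by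
    simp [finalize, bang]
  rw [hfin, h]
  simp [doneW, PySem.Chars.split₀, bang, List.map_map, Function.comp_def]
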